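-- pv_equiv track=rewrite | github.com/PontentialProgrammer/VAS2NETS_HACKATHON | solution.py | minimum_checkpoint
-- ===== SOURCE A (Python) =====
-- def minimum_checkpoint(i):
--     for j in range(i + 1, 1001):
--         temp_i, temp_j = i, j
--         while temp_i < 1000 and temp_j < 1000:
--             temp_i += 2
--             temp_j += 1
--         if temp_j >= 1000 and temp_i < 1000:
--             return f"{j} is the minimum checkpoint for Romeo to win"
--     return "No j checkpoint allows Romeo to win"
-- ===== SOURCE B (Python) =====
-- def minimum_checkpoint(i):
--     # Closed form: Romeo (start i, step 2) beats the checkpoint runner (start j, step 1)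
--     # exactly when 2*j > 1000 + i; the minimal such j >= i+1 is max(i+1, (i+1002)//2),
--     # which is always <= 1000 when i <= 999.
--     if i <= 999:
--         j = max(i + 1, (i + 1002) // 2)
--         return f"{j} is the minimum checkpoint for Romeo to win"
--     return "No j checkpoint allows Romeo to win"
-- ===== Notes on version B (the rewrite author's own statement) =====
-- stated objective: faster
-- what changed: B replaces A's outer scan over candidate checkpoints with a nested step-by-step race simulation per candidate by the closed form 'j wins iff 2*j > 1000 + i', returning max(i+1, (i+1002)//2) directly.
import Mathlib
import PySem

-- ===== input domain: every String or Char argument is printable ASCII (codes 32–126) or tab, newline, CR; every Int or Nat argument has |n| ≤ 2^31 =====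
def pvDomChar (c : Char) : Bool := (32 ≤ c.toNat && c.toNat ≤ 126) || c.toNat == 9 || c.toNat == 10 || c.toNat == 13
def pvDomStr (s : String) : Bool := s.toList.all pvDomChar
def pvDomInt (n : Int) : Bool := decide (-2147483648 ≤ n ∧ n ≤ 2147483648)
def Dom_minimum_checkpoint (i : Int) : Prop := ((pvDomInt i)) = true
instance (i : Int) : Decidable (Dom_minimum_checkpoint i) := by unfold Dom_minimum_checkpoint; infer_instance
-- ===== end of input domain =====

-- B replaces A's per-candidate race simulation with the closed form 'j wins iff 2*j > 1000 + i' (objective: faster).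

-- ===== PORT A =====
-- the inner 'while temp_i < 1000 and temp_j < 1000: temp_i += 2; temp_j += 1' loop
def pvSimLoop (ti tj : Int) : Int × Int :=
  if ti < 1000 ∧ tj < 1000 then pvSimLoop (ti + 2) (tj + 1) else (ti, tj)
termination_by (1000 - tj).toNat
decreasing_by omega

-- the 'for j in range(i + 1, 1001)' loop with its early return
def pvOuter (i : Int) : List Int → String
  | [] => "No j checkpoint allows Romeo to win"
  | j :: rest =>
      if (pvSimLoop i j).2 ≥ 1000 ∧ (pvSimLoop i j).1 < 1000 then
        PySem.Int.toStr j ++ " is the minimum checkpoint for Romeo to win"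
      else pvOuter i rest

def minimum_checkpoint (i : Int) : String :=
  pvOuter i (PySem.List.pyRange (i + 1) 1001 1)

-- ===== PORT B =====
def minimum_checkpoint_alt (i : Int) : String :=
  if i ≤ 999 then
    PySem.Int.toStr (max (i + 1) (PySem.Int.floordiv (i + 1002) 2)) ++
      " is the minimum checkpoint for Romeo to win"
  else "No j checkpoint allows Romeo to win"

-- ===== PRECONDITION & SPEC =====
def Spec_minimum_checkpoint (i : Int) (out : String) : Prop := out = minimum_checkpoint_alt i
instance (i : Int) (out : String) : Decidable (Spec_minimum_checkpoint i out) := by unfold Spec_minimum_checkpoint; infer_instance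

-- ===== CLAIM (what is proved, stated in full; the proofs are below) =====
def Claim_equal_minimum_checkpoint : Prop := ∀ (i : Int), Dom_minimum_checkpoint i → Spec_minimum_checkpoint i (minimum_checkpoint i)

-- ===== LEMMAS AND PROOFS =====

-- A's inner simulation ends with (temp_j ≥ 1000 ∧ temp_i < 1000) exactly when 2*tj > 1000 + ti and ti < 1000
theorem pvSimLoop_win (ti tj : Int) :
    ((pvSimLoop ti tj).2 ≥ 1000 ∧ (pvSimLoop ti tj).1 < 1000) ↔ (ti < 1000 ∧ 2 * tj > 1000 + ti) := by
  fun_induction pvSimLoop ti tj with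
  | case1 ti tj h ih => rw [ih]; omega
  | case2 ti tj h => simp only []; omega

-- A's outer loop over range(a, 1001) returns the winning string at max a ((i+1002)//2) whenever i < 1000 and a ≤ 1000
theorem pvOuter_range (i : Int) (hi : i < 1000) :
    ∀ n : Nat, ∀ a : Int, (1001 - a).toNat = n → a ≤ 1000 →
      pvOuter i (PySem.List.pyRange a 1001 1) =
        PySem.Int.toStr (max a (PySem.Int.floordiv (i + 1002) 2)) ++
          " is the minimum checkpoint for Romeo to win" := by
  intro n
  induction n with
  | zero => intro a hn ha; omega
  | succ m ih =>
      intro a hn ha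
      rw [PySem.List.pyRange_one_cons (by omega)]
      rw [PySem.Int.floordiv_eq_ediv_of_pos (by norm_num)]
      simp only [pvOuter]
      by_cases h : (pvSimLoop i a).2 ≥ 1000 ∧ (pvSimLoop i a).1 < 1000
      · rw [if_pos h]
        rw [pvSimLoop_win] at h
        have : max a ((i + 1002) / 2) = a := by omega
        rw [this]
      · rw [if_neg h]
        rw [pvSimLoop_win] at h
        have ha' : a ≤ 999 := by omega
        have := ih (a + 1) (by omega) (by omega)
        rw [PySem.Int.floordiv_eq_ediv_of_pos (by norm_num)] at this
        rw [this]
        have : max (a + 1) ((i + 1002) / 2) = max a ((i + 1002) / 2) := by omega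
        rw [this]

-- ===== VERDICT (by name: the statement is the Claim_ definition above) =====
theorem minimum_checkpoint_spec : Claim_equal_minimum_checkpoint := by
  intro i _
  unfold Spec_minimum_checkpoint minimum_checkpoint minimum_checkpoint_alt
  by_cases hi : i ≤ 999
  · rw [if_pos hi]
    exact pvOuter_range i (by omega) (1001 - (i + 1)).toNat (i + 1) rfl (by omega)
  · rw [if_neg hi, PySem.List.pyRange_one_eq_nil (by omega)]
    rfl
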